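-- pv_equiv track=rewrite | github.com/nlao1/advent-of-code-25 | 03/solution.py | max_joltage_part_1
-- ===== SOURCE A (Python) =====
-- def max_joltage_part_1(bank: list[int]):
--     max_start_battery: Optional[int] = None
--     curr_max_joltage: Optional[int] = None
--     for i, battery_joltage in enumerate(bank):
--         if i == len(bank) - 1:
--             break
--         if max_start_battery is None or battery_joltage > max_start_battery:
--             candidate = 10 * battery_joltage + max(bank[i + 1 :])
--             if curr_max_joltage is None or candidate > curr_max_joltage:
--                 max_start_battery = battery_joltage
--                 curr_max_joltage = candidate
--     return curr_max_joltage
-- ===== SOURCE B (Python) =====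
-- def max_joltage_part_1(bank: list[int]):
--     # One right-to-left pass keeping a running suffix maximum: O(n) instead of O(n^2).
--     if len(bank) < 2:
--         return None
--     best = None
--     suffix_max = bank[-1]
--     for b in reversed(bank[:-1]):
--         candidate = 10 * b + suffix_max
--         if best is None or candidate > best:
--             best = candidate
--         if b > suffix_max:
--             suffix_max = b
--     return best
-- ===== Notes on version B (the rewrite author's own statement) =====
-- stated objective: faster
-- what changed: Replaced the left-to-right scan that recomputes max(bank[i+1:]) with a single right-to-left pass maintaining a running suffix maximum, so the inner max over the suffix disappears.
import Mathlib
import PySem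

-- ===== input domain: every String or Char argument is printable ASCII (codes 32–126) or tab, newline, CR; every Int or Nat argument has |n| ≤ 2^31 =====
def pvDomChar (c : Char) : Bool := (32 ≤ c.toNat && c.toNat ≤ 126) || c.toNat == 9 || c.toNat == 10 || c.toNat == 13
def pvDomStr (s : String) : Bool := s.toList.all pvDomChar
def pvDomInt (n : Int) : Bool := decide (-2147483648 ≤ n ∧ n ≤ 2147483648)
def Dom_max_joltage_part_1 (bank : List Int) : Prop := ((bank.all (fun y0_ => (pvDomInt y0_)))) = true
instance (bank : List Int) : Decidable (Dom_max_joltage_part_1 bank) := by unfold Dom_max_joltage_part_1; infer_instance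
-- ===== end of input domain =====

-- B replaces A's per-position max(bank[i+1:]) rescans by one right-to-left pass with a
-- running suffix maximum (the objective is an asymptotically faster algorithm).

-- ===== PORT A =====
-- A's loop `for i, battery in enumerate(bank)` with the break at i == len(bank)-1,
-- as structural recursion on the remaining list: when processing the element at index i,
-- the remaining tail `rest` is exactly bank[i+1:], so `rest = []` is the break condition
-- and `max(bank[i+1:])` is `max` of `rest` (nonempty there; `.getD 0` is unreachable).
def pvAGo : List Int → Option Int → Option Int → Option Int
  | [], _, curr => curr
  | b :: rest, ms, curr =>
    if rest.isEmpty then curr          -- i == len(bank) - 1: break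
    else if (match ms with | none => true | some m => decide (m < b)) then
      -- candidate = 10 * battery_joltage + max(bank[i + 1:])
      let cand := 10 * b + (PySem.List.max? rest (fun x => x)).getD 0
      if (match curr with | none => true | some c => decide (c < cand)) then
        pvAGo rest (some b) (some cand)
      else
        pvAGo rest ms curr
    else
      pvAGo rest ms curr

def max_joltage_part_1 (bank : List Int) : Option Int :=
  pvAGo bank none none

-- ===== PORT B =====
-- B's loop `for b in reversed(bank[:-1])` with state (best, suffix_max).
def pvBGo : List Int → Option Int → Int → Option Int
  | [], best, _ => best
  | b :: rest, best, sm =>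
    let cand := 10 * b + sm
    let best' := if (match best with | none => true | some c => decide (c < cand)) then some cand else best
    let sm' := if sm < b then b else sm
    pvBGo rest best' sm'

def max_joltage_part_1_alt (bank : List Int) : Option Int :=
  if bank.length < 2 then none
  else
    pvBGo ((PySem.List.slice bank none (some (-1))).reverse) none
      ((PySem.List.pyGet? bank (-1)).getD 0)

-- ===== PRECONDITION & SPEC =====
def Spec_max_joltage_part_1 (bank : List Int) (out : Option Int) : Prop := out = max_joltage_part_1_alt bank
instance (bank : List Int) (out : Option Int) : Decidable (Spec_max_joltage_part_1 bank out) := by unfold Spec_max_joltage_part_1; infer_instance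

-- ===== CLAIM (what is proved, stated in full; the proofs are below) =====
def Claim_equal_max_joltage_part_1 : Prop := ∀ (bank : List Int), Dom_max_joltage_part_1 bank → Spec_max_joltage_part_1 bank (max_joltage_part_1 bank)

-- ===== LEMMAS AND PROOFS =====

-- running maximum of a list with seed a
def pvCmax (a : Int) (l : List Int) : Int := l.foldl max a

theorem pvCmax_nil (a : Int) : pvCmax a [] = a := rfl

theorem pvCmax_cons (a b : Int) (l : List Int) : pvCmax a (b :: l) = pvCmax (max a b) l := rfl

theorem pvCmax_max_out (l : List Int) : ∀ a b : Int, pvCmax (max a b) l = max (pvCmax a l) b := by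
  induction l with
  | nil => intro a b; simp [pvCmax]
  | cons c l ih =>
    intro a b
    rw [pvCmax_cons, pvCmax_cons]
    have h : max (max a b) c = max (max a c) b := by omega
    rw [h, ih]

theorem pvCmax_mono (l : List Int) : ∀ a b : Int, a ≤ b → pvCmax a l ≤ pvCmax b l := by
  induction l with
  | nil => intro a b h; simpa [pvCmax] using h
  | cons c l ih =>
    intro a b h
    rw [pvCmax_cons, pvCmax_cons]
    exact ih _ _ (by omega)

theorem pvCmax_append_singleton (a x : Int) (l : List Int) :
    pvCmax a (l ++ [x]) = max (pvCmax a l) x := by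
  simp [pvCmax, List.foldl_append]

theorem pvCmax_reverse (l : List Int) : ∀ a : Int, pvCmax a l.reverse = pvCmax a l := by
  induction l with
  | nil => intro a; rfl
  | cons b l ih =>
    intro a
    rw [List.reverse_cons, pvCmax_append_singleton, ih, pvCmax_cons, pvCmax_max_out]

theorem pvCmax_last_dropLast (l : List Int) : ∀ b : Int,
    pvCmax (((b :: l).getLast?).getD 0) ((b :: l).dropLast) = pvCmax b l := by
  induction l with
  | nil => intro b; simp [pvCmax]
  | cons c l ih =>
    intro b
    have h1 : (b :: c :: l).getLast? = (c :: l).getLast? := by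
      simp [List.getLast?_cons_cons]
    have h2 : (b :: c :: l).dropLast = b :: (c :: l).dropLast := by
      simp [List.dropLast_cons_of_ne_nil]
    rw [h1, h2, pvCmax_cons, pvCmax_max_out, ih, pvCmax_cons, max_comm b c, pvCmax_max_out]

theorem pvStepEq (m x : Int) : (if m < x then some x else some m) = some (max m x) := by
  split_ifs with h <;> simp <;> omega

theorem pvMax?_cons (b : Int) (l : List Int) :
    PySem.List.max? (b :: l) (fun x => x) = some (pvCmax b l) := by
  induction l generalizing b with
  | nil => rfl
  | cons c l ih =>
    have h : PySem.List.max? (b :: c :: l) (fun x : Int => x)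
        = PySem.List.max? (max b c :: l) (fun x : Int => x) := by
      show List.foldl _ none (b :: c :: l) = List.foldl _ none (max b c :: l)
      rw [List.foldl_cons, List.foldl_cons, List.foldl_cons]
      congr 1
      show (if b < c then some c else some b) = some (max b c)
      exact pvStepEq b c
    rw [h, ih, pvCmax_cons]

-- the common value: best joltage of the list a :: b :: l
def pvGv : Int → Int → List Int → Int
  | a, b, [] => 10 * a + b
  | a, b, c :: l => max (10 * a + pvCmax b (c :: l)) (pvGv b c l)

def pvHv (b : Int) (l : List Int) (c : Int) : Int :=
  match l with
  | [] => c
  | d :: l' => max c (pvGv b d l')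

-- A's loop, step-normalised
theorem pvAGo_step (b d : Int) (l' : List Int) (m c : Int) :
    pvAGo (b :: d :: l') (some m) (some c) =
      if m < b then
        (if c < 10 * b + pvCmax d l' then
           pvAGo (d :: l') (some b) (some (10 * b + pvCmax d l'))
         else pvAGo (d :: l') (some m) (some c))
      else pvAGo (d :: l') (some m) (some c) := by
  simp only [pvAGo, List.isEmpty_cons, Bool.false_eq_true, if_false, pvMax?_cons,
    Option.getD_some, decide_eq_true_eq]

-- A's loop, given the invariant 10*m + max(remaining) ≤ c, computes the max of all candidates
theorem pvAGo_main (l : List Int) : ∀ (b m c : Int), 10 * m + pvCmax b l ≤ c →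
    pvAGo (b :: l) (some m) (some c) = some (pvHv b l c) := by
  induction l with
  | nil => intro b m c _; simp [pvAGo, pvHv]
  | cons d l' ih =>
    intro b m c hinv
    rw [pvCmax_cons] at hinv
    have hsuf : pvCmax d l' ≤ pvCmax (max b d) l' := pvCmax_mono l' d (max b d) (by omega)
    rw [pvAGo_step]
    by_cases hb : m < b
    · rw [if_pos hb]
      by_cases hc : c < 10 * b + pvCmax d l'
      · rw [if_pos hc, ih d b _ (le_refl _)]
        cases l' with
        | nil => simp only [pvHv, pvGv, pvCmax_nil, Option.some.injEq] at *; omega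
        | cons e l'' => simp only [pvHv, pvGv, Option.some.injEq] at *; omega
      · rw [if_neg hc, ih d m c (by omega)]
        cases l' with
        | nil => simp only [pvHv, pvGv, pvCmax_nil, Option.some.injEq] at *; omega
        | cons e l'' => simp only [pvHv, pvGv, Option.some.injEq] at *; omega
    · rw [if_neg hb, ih d m c (by omega)]
      have hble : b ≤ m := by omega
      cases l' with
      | nil => simp only [pvHv, pvGv, pvCmax_nil, Option.some.injEq] at *; omega
      | cons e l'' => simp only [pvHv, pvGv, Option.some.injEq] at *; omega

theorem pvA_correct (a b : Int) (l : List Int) :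
    max_joltage_part_1 (a :: b :: l) = some (pvGv a b l) := by
  have h0 : max_joltage_part_1 (a :: b :: l)
      = pvAGo (b :: l) (some a) (some (10 * a + pvCmax b l)) := by
    show pvAGo (a :: b :: l) none none = _
    simp [pvAGo, pvMax?_cons]
  rw [h0, pvAGo_main l b a _ (le_refl _)]
  cases l with
  | nil => simp [pvHv, pvGv, pvCmax_nil]
  | cons d l' =>
    simp only [pvHv, pvGv]

-- B's loop as a fold over the full state
def pvBStep (s : Option Int × Int) (b : Int) : Option Int × Int :=
  let cand := 10 * b + s.2
  ((if (match s.1 with | none => true | some c => decide (c < cand)) then some cand else s.1),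
   (if s.2 < b then b else s.2))

theorem pvBGo_eq_foldl (l : List Int) : ∀ (best : Option Int) (sm : Int),
    pvBGo l best sm = (List.foldl pvBStep (best, sm) l).1 := by
  induction l with
  | nil => intro best sm; rfl
  | cons b l ih => intro best sm; rw [List.foldl_cons]; exact ih _ _

theorem pvBFoldl_snd (l : List Int) : ∀ (best : Option Int) (sm : Int),
    (List.foldl pvBStep (best, sm) l).2 = pvCmax sm l := by
  induction l with
  | nil => intro best sm; rfl
  | cons b l ih =>
    intro best sm
    rw [List.foldl_cons, ih, pvCmax_cons]
    have : (pvBStep (best, sm) b).2 = max sm b := by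
      show (if sm < b then b else sm) = max sm b
      omega
    rw [this]

theorem pvB_correct (l : List Int) : ∀ a b : Int,
    max_joltage_part_1_alt (a :: b :: l) = some (pvGv a b l) := by
  induction l with
  | nil =>
    intro a b
    show (if _ then _ else _) = _
    rw [if_neg (by simp)]
    rw [PySem.List.slice_to_neg_one, PySem.List.pyGet?_neg_one]
    simp [pvBGo, pvGv]
  | cons d l' ih =>
    intro a b
    -- unfold the outer call
    have hlen : ¬ (a :: b :: d :: l').length < 2 := by simp
    have hdl : (a :: b :: d :: l').dropLast = a :: (b :: d :: l').dropLast := by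
      simp [List.dropLast_cons_of_ne_nil]
    have hgl : (a :: b :: d :: l').getLast? = (b :: d :: l').getLast? := by
      simp [List.getLast?_cons_cons]
    have h1 : max_joltage_part_1_alt (a :: b :: d :: l')
        = pvBGo ((b :: d :: l').dropLast.reverse ++ [a]) none
            (((b :: d :: l').getLast?).getD 0) := by
      show (if _ then _ else _) = _
      rw [if_neg hlen, PySem.List.slice_to_neg_one, PySem.List.pyGet?_neg_one, hdl, hgl]
      rw [List.reverse_cons]
    -- unfold the inner (smaller) call
    have h2 : max_joltage_part_1_alt (b :: d :: l')
        = pvBGo ((b :: d :: l').dropLast.reverse) none (((b :: d :: l').getLast?).getD 0) := by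
      show (if _ then _ else _) = _
      rw [if_neg (by simp), PySem.List.slice_to_neg_one, PySem.List.pyGet?_neg_one]
    set g0 := ((b :: d :: l').getLast?).getD 0 with hg0
    have hfst : (List.foldl pvBStep (none, g0) ((b :: d :: l').dropLast.reverse)).1
        = some (pvGv b d l') := by
      rw [← pvBGo_eq_foldl, ← h2, ih b d]
    have hsnd : (List.foldl pvBStep (none, g0) ((b :: d :: l').dropLast.reverse)).2
        = pvCmax b (d :: l') := by
      rw [pvBFoldl_snd, pvCmax_reverse, hg0, pvCmax_last_dropLast]
    rw [h1, pvBGo_eq_foldl, List.foldl_append]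
    rw [List.foldl_cons, List.foldl_nil]
    rcases hS : List.foldl pvBStep (none, g0) ((b :: d :: l').dropLast.reverse) with ⟨S1, S2⟩
    rw [hS] at hfst hsnd
    simp only at hfst hsnd
    subst hfst hsnd
    show (if _ then some (10 * a + pvCmax b (d :: l')) else some (pvGv b d l')) = _
    simp only [decide_eq_true_eq]
    rw [pvStepEq (pvGv b d l') (10 * a + pvCmax b (d :: l'))]
    simp only [pvGv]
    congr 1
    omega

theorem pvMain (bank : List Int) : max_joltage_part_1 bank = max_joltage_part_1_alt bank := by
  match bank with
  | [] => rfl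
  | [a] => rfl
  | a :: b :: l => rw [pvA_correct, pvB_correct]

-- ===== VERDICT (by name: the statement is the Claim_ definition above) =====
theorem max_joltage_part_1_spec : Claim_equal_max_joltage_part_1 := by
  intro bank _
  show max_joltage_part_1 bank = max_joltage_part_1_alt bank
  exact pvMain bank
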